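-- pv_equiv track=rewrite | github.com/Hajimi06/Word2Grid | main.py | layout_to_grid
-- ===== SOURCE A (Python) =====
-- def layout_to_grid(paragraphs, cols=23):
--     """
--     将段落文本排版到格子中。
--     规则：
--     - 每行最多 cols 个格子
--     - 每一段的首行都空两个格
--     - 标点（逗号、冒号、引号等）之间尽量挤到同一格：
--         - 如果当前是标点，且前一个格子是“纯标点格”，并且长度 < 2，就合并到前一个格子
--         - 所以 '，：'、'：“'、'，”' 等可以出现在同一个格子
--     """
--     lines = []
--     current_line = []
--
--     # 认为是标点的字符集合（可以按需要再加）
--     PUNCS = set('，。、！？：；、“”‘’（）()《》〈〉——…,:;"\'')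
--
--     for text in paragraphs:
--         chars = list(text)
--
--         # 每一段开始前，如果当前行有内容，先收尾换行
--         if current_line:
--             lines.append(current_line)
--             current_line = []
--
--         # 每一段首行空两个格
--         current_line.extend(["", ""])
--
--         for ch in chars:
--             is_punc = ch in PUNCS
--
--             # 如果是标点，尝试和前一个格子合并
--             if is_punc and current_line:
--                 last = current_line[-1]
--                 # 前一个格子是“纯标点格”且里面标点数量 < 2
--                 if last != "" and all(c in PUNCS for c in last) and len(last) < 2:
--                     current_line[-1] = last + ch   # 例如 '，' + '：' -> '，：'
--                     continue
--
--             # 否则正常进入新格子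
--             if len(current_line) >= cols:
--                 lines.append(current_line)
--                 current_line = []
--             current_line.append(ch)
--
--     # 收尾最后一行
--     if current_line:
--         lines.append(current_line)
--
--     # 补齐到固定列数
--     padded_lines = []
--     for line in lines:
--         if len(line) < cols:
--             line = line + [""] * (cols - len(line))
--         else:
--             line = line[:cols]
--         padded_lines.append(line)
--
--     return padded_lines
-- ===== SOURCE B (Python) =====
-- def layout_to_grid(paragraphs, cols=23):
--     PUNCS = set('，。、！？：；、“”‘’（）()《》〈〉——…,:;"\'')
--     rows = []
--     for text in paragraphs:
--         # build the paragraph's flat cell list: two leading indent cells, then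
--         # one cell per char, merging a punctuation into a short pure-punctuation last cell
--         cells = ["", ""]
--         for ch in text:
--             last = cells[-1]
--             if ch in PUNCS and last != "" and all(c in PUNCS for c in last) and len(last) < 2:
--                 cells[-1] = last + ch
--             else:
--                 cells.append(ch)
--         # chunk into rows of cols cells, padding the last chunk
--         for i in range(0, len(cells), cols):
--             chunk = cells[i:i + cols]
--             rows.append(chunk + [""] * (cols - len(chunk)))
--     return rows
-- ===== Notes on version B (the rewrite author's own statement) =====
-- stated objective: simpler
-- what changed: B replaces A's interleaved build-and-wrap loop with mutable line buffer plus a separate pad/truncate pass by, per paragraph, building a flat cell list first and then chunking it into padded rows of cols cells in one pass.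
-- outside the precondition, e.g. on layout_to_grid(['ab'], 1): A returns [[''], ['a'], ['b']], B returns [[''], [''], ['a'], ['b']]; on layout_to_grid(['ab'], 0): A returns [[], [], []], B raises ValueError
import Mathlib
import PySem

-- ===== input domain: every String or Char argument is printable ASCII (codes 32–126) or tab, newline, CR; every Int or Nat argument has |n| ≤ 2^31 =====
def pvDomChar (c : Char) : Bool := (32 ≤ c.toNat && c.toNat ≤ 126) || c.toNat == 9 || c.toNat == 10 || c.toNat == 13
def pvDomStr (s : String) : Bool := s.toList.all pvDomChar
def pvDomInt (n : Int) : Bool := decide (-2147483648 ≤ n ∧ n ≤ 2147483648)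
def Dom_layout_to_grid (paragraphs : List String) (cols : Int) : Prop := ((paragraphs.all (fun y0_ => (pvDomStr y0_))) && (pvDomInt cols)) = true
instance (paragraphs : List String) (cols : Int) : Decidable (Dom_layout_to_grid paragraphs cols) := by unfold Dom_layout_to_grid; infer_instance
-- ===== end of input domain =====

-- B builds each paragraph's flat cell list first and then chunks it into padded rows,
-- replacing A's interleaved build-and-wrap loop plus separate pad pass (objective: simpler).


-- the PUNCS constant shared verbatim by both Pythons
def pvPuncs : List Char := "，。、！？：；、“”‘’（）()《》〈〉——…,:;\"'".toList

-- ===== PORT A =====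
-- cells are Python strings, represented as List Char; rows as List (List Char)

-- the "normal new cell" path: wrap the line if it is full, then append the char
def pvAppendA (cols : Int) (lines : List (List (List Char))) (cur : List (List Char)) (ch : Char) :
    List (List (List Char)) × List (List Char) :=
  if cols ≤ (cur.length : Int) then (lines ++ [cur], [[ch]]) else (lines, cur ++ [[ch]])

-- body of A's inner `for ch in chars` loop
def pvStepA (cols : Int) (st : List (List (List Char)) × List (List Char)) (ch : Char) :
    List (List (List Char)) × List (List Char) :=
  if pvPuncs.contains ch && !st.2.isEmpty then
    match st.2.getLast? with
    | some last =>
        if !last.isEmpty && last.all (fun c => pvPuncs.contains c) && last.length < 2 then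
          (st.1, st.2.dropLast ++ [last ++ [ch]])
        else pvAppendA cols st.1 st.2 ch
    | none => pvAppendA cols st.1 st.2 ch
  else pvAppendA cols st.1 st.2 ch

-- body of A's outer `for text in paragraphs` loop
def pvParaA (cols : Int) (st : List (List (List Char)) × List (List Char)) (text : String) :
    List (List (List Char)) × List (List Char) :=
  let st1 := if st.2.isEmpty then st else (st.1 ++ [st.2], [])
  text.toList.foldl (pvStepA cols) (st1.1, st1.2 ++ [[], []])

-- A's final pad-or-truncate of one line (line[:cols] via PySem slice)
def pvPadA (cols : Int) (line : List (List Char)) : List (List Char) :=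
  if (line.length : Int) < cols then line ++ List.replicate (cols - (line.length : Int)).toNat []
  else PySem.List.slice line none (some cols)

def layout_to_grid (paragraphs : List String) (cols : Int) : List (List String) :=
  let st := paragraphs.foldl (pvParaA cols) ([], [])
  let lines := if st.2.isEmpty then st.1 else st.1 ++ [st.2]
  lines.map (fun line => (pvPadA cols line).map (fun c => String.mk c))

-- ===== PORT B =====
-- body of B's cell-building loop: merge a punctuation into a short pure-punctuation last cell
def pvCellStep (cells : List (List Char)) (ch : Char) : List (List Char) :=
  match cells.getLast? with
  | some last =>
      if pvPuncs.contains ch && !last.isEmpty && last.all (fun c => pvPuncs.contains c) && last.length < 2 then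
        cells.dropLast ++ [last ++ [ch]]
      else cells ++ [[ch]]
  | none => cells ++ [[ch]]

-- B's `range(0, len(cells), cols)` chunking (cols ≥ 1 under Pre_; cols = 0 is unreachable there)
def pvChunks (n : Nat) (l : List (List Char)) : List (List (List Char)) :=
  if l = [] ∨ n = 0 then [] else l.take n :: pvChunks n (l.drop n)
termination_by l.length
decreasing_by
  rename_i h
  rw [not_or] at h
  cases l with
  | nil => exact absurd rfl h.1
  | cons a as => simp [List.length_drop]; omega

def layout_to_grid_alt (paragraphs : List String) (cols : Int) : List (List String) :=
  paragraphs.flatMap (fun text =>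
    let cells := text.toList.foldl pvCellStep [[], []]
    (pvChunks cols.toNat cells).map (fun chunk =>
      (chunk ++ List.replicate (cols - (chunk.length : Int)).toNat []).map (fun c => String.mk c)))

-- ===== PRECONDITION & SPEC =====
-- Pre_ excludes cols ≤ 1, where the row width is smaller than the two-cell paragraph indent A
-- inserts: A's flush-then-truncate output there is an accident of its line buffer (it emits rows
-- narrower than the indent it just created), and B's chunker raises ValueError for cols ≤ 0.
def Pre_layout_to_grid (paragraphs : List String) (cols : Int) : Prop := 2 ≤ cols
instance (paragraphs : List String) (cols : Int) : Decidable (Pre_layout_to_grid paragraphs cols) := by unfold Pre_layout_to_grid; infer_instance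
def pvWitness_layout_to_grid : List String × Int := (["hi,: a", ""], 3)

def Spec_layout_to_grid (paragraphs : List String) (cols : Int) (out : List (List String)) : Prop := out = layout_to_grid_alt paragraphs cols
instance (paragraphs : List String) (cols : Int) (out : List (List String)) : Decidable (Spec_layout_to_grid paragraphs cols out) := by unfold Spec_layout_to_grid; infer_instance

-- ===== CLAIM (what is proved, stated in full; the proofs are below) =====
def Claim_equal_layout_to_grid : Prop := ∀ (paragraphs : List String) (cols : Int), Dom_layout_to_grid paragraphs cols → Pre_layout_to_grid paragraphs cols → Spec_layout_to_grid paragraphs cols (layout_to_grid paragraphs cols)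

-- ===== LEMMAS AND PROOFS =====

-- the merge condition, as one boolean, for case analysis
def pvMerge (cells : List (List Char)) (ch : Char) : Bool :=
  match cells.getLast? with
  | some last => pvPuncs.contains ch && !last.isEmpty && last.all (fun c => pvPuncs.contains c) && last.length < 2
  | none => false

lemma cellStep_ne_nil (cells : List (List Char)) (ch : Char) : pvCellStep cells ch ≠ [] := by
  unfold pvCellStep
  rcases h : cells.getLast? with _ | last <;> simp
  split <;> simp

lemma cellStep_merge (cells : List (List Char)) (ch : Char) (h : pvMerge cells ch = true) :
    pvCellStep cells ch = cells.dropLast ++ [cells.getLast?.getD [] ++ [ch]] := by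
  induction cells using List.reverseRecOn with
  | nil => simp [pvMerge] at h
  | append_singleton ys y _ =>
      simp only [pvMerge, List.getLast?_concat] at h
      simp only [pvCellStep, List.getLast?_concat, Option.getD_some]
      rw [if_pos h]

lemma cellStep_nomerge (cells : List (List Char)) (ch : Char) (h : pvMerge cells ch = false) :
    pvCellStep cells ch = cells ++ [[ch]] := by
  induction cells using List.reverseRecOn with
  | nil => simp [pvCellStep]
  | append_singleton ys y _ =>
      simp only [pvMerge, List.getLast?_concat] at h
      simp only [pvCellStep, List.getLast?_concat]
      rw [if_neg (by simp at h ⊢; tauto)]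

lemma cellStep_append (p xs : List (List Char)) (ch : Char) (h : xs ≠ []) :
    pvCellStep (p ++ xs) ch = p ++ pvCellStep xs ch := by
  induction xs using List.reverseRecOn with
  | nil => exact absurd rfl h
  | append_singleton ys y _ =>
      simp only [pvCellStep, ← List.append_assoc, List.getLast?_concat, List.dropLast_concat]
      split <;> simp

lemma foldl_cellStep_append (cs : List Char) (p : List (List Char)) :
    ∀ xs, xs ≠ [] → cs.foldl pvCellStep (p ++ xs) = p ++ cs.foldl pvCellStep xs := by
  induction cs with
  | nil => intro xs h; simp
  | cons c cs ih =>
      intro xs h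
      simp only [List.foldl_cons]
      rw [cellStep_append p xs c h, ih _ (cellStep_ne_nil xs c)]

lemma chunks_singleton (n : Nat) (l : List (List Char)) (h : l ≠ []) (hl : l.length ≤ n) :
    pvChunks n l = [l] := by
  have hn : n ≠ 0 := by
    cases l with
    | nil => exact absurd rfl h
    | cons a as => simp at hl; omega
  rw [pvChunks, if_neg (by simp [h, hn]), List.take_of_length_le hl,
      pvChunks, if_pos (Or.inl (List.drop_eq_nil_of_le hl))]

lemma chunks_cons_full (n : Nat) (p rest : List (List Char)) (hp : p.length = n) (hn : n ≠ 0) :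
    pvChunks n (p ++ rest) = p :: pvChunks n rest := by
  have hpne : p ≠ [] := by cases p <;> simp_all
  rw [pvChunks, if_neg (by simp [hpne, hn])]
  congr 1
  · rw [← hp, List.take_left]
  · rw [← hp, List.drop_left]

lemma chunks_mem_length (n : Nat) (l : List (List Char)) :
    ∀ c ∈ pvChunks n l, c.length ≤ n := by
  induction hk : l.length using Nat.strong_induction_on generalizing l with
  | _ k ih =>
      rw [pvChunks]
      split
      · simp
      · rename_i hcond
        intro c hc
        rcases List.mem_cons.mp hc with rfl | hc
        · simpa using List.length_take_le n l
        · refine ih (l.drop n).length ?_ (l.drop n) rfl c hc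
          subst hk
          rcases l with _ | ⟨a, as⟩
          · exact absurd (Or.inl rfl) hcond
          · have hn : n ≠ 0 := fun hn => hcond (Or.inr hn)
            simp [List.length_drop]
            omega

-- one step of A equals one step of B on the current line, given the line is nonempty and not full
lemma stepA_eq (cols : Int) (L : List (List (List Char))) (cur : List (List Char)) (ch : Char)
    (h : cur ≠ []) :
    pvStepA cols (L, cur) ch =
      if pvMerge cur ch then (L, pvCellStep cur ch) else pvAppendA cols L cur ch := by
  induction cur using List.reverseRecOn with
  | nil => exact absurd rfl h
  | append_singleton ys y _ =>
      simp only [pvStepA, pvMerge, pvCellStep, List.getLast?_concat]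
      cases hp : pvPuncs.contains ch <;>
        by_cases hm : ((!y.isEmpty && y.all fun c => pvPuncs.contains c) && decide (y.length < 2)) = true <;>
          simp [hm] <;> simp_all

-- invariant-carrying main loop lemma: A's interleaved loop computes B's flat cells, chunked
lemma loopA (cols : Int) (hc : 2 ≤ cols) (cs : List Char) :
    ∀ (L : List (List (List Char))) (cur : List (List Char)), cur ≠ [] → (cur.length : Int) ≤ cols →
      ((cs.foldl (pvStepA cols) (L, cur)).1 ++ [(cs.foldl (pvStepA cols) (L, cur)).2]
          = L ++ pvChunks cols.toNat (cs.foldl pvCellStep cur))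
      ∧ (cs.foldl (pvStepA cols) (L, cur)).2 ≠ []
      ∧ ((cs.foldl (pvStepA cols) (L, cur)).2.length : Int) ≤ cols := by
  induction cs with
  | nil =>
      intro L cur h hl
      refine ⟨?_, h, hl⟩
      simp only [List.foldl_nil]
      rw [chunks_singleton _ _ h (by omega)]
  | cons c cs ih =>
      intro L cur h hl
      simp only [List.foldl_cons]
      rw [stepA_eq cols L cur c h]
      by_cases hm : pvMerge cur c
      · rw [if_pos hm]
        have hlen : (pvCellStep cur c).length = cur.length := by
          rw [cellStep_merge _ _ hm]
          cases cur with
          | nil => exact absurd rfl h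
          | cons a as => simp
        exact ih L (pvCellStep cur c) (cellStep_ne_nil cur c) (by rw [hlen]; exact hl)
      · rw [if_neg hm, cellStep_nomerge _ _ (by simpa using hm)]
        unfold pvAppendA
        by_cases hfull : cols ≤ (cur.length : Int)
        · rw [if_pos hfull]
          have hn : cur.length = cols.toNat := by omega
          obtain ⟨h1, h2, h3⟩ := ih (L ++ [cur]) [[c]] (by simp) (by simp; omega)
          refine ⟨?_, h2, h3⟩
          rw [h1, foldl_cellStep_append cs cur [[c]] (by simp),
              chunks_cons_full cols.toNat cur _ hn (by omega)]
          simp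
        · rw [if_neg hfull]
          have := ih L (cur ++ [[c]]) (by simp) (by simp; omega)
          simpa using this

-- the paragraph-level fold, with "finalize" = A's trailing `if current_line: lines.append(...)`
lemma paraFold (cols : Int) (hc : 2 ≤ cols) (ps : List String) :
    ∀ (L : List (List (List Char))) (cur : List (List Char)),
      (cur = [] ∨ ((cur.length : Int) ≤ cols)) →
      (let st := ps.foldl (pvParaA cols) (L, cur)
       (if st.2.isEmpty then st.1 else st.1 ++ [st.2])
         = (if cur.isEmpty then L else L ++ [cur])
            ++ ps.flatMap (fun t => pvChunks cols.toNat (t.toList.foldl pvCellStep [[], []]))) := by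
  induction ps with
  | nil =>
      intro L cur _
      cases cur <;> simp
  | cons t ps ih =>
      intro L cur hcur
      simp only [List.foldl_cons]
      have hstate : pvParaA cols (L, cur) t
          = t.toList.foldl (pvStepA cols) ((if cur.isEmpty then L else L ++ [cur]), [[], []]) := by
        unfold pvParaA
        cases cur <;> simp
      rw [hstate]
      obtain ⟨h1, h2, h3⟩ := loopA cols hc t.toList (if cur.isEmpty then L else L ++ [cur]) [[], []]
        (by simp) (by simp; omega)
      have := ih (t.toList.foldl (pvStepA cols) ((if cur.isEmpty then L else L ++ [cur]), [[], []])).1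
        (t.toList.foldl (pvStepA cols) ((if cur.isEmpty then L else L ++ [cur]), [[], []])).2
        (Or.inr h3)
      simp only [Prod.mk.eta] at this
      rw [this]
      rw [if_neg (by simpa [List.isEmpty_iff] using h2), h1]
      simp [List.flatMap_cons]

-- padding: on a chunk of length ≤ cols the two pads agree
lemma padA_eq (cols : Int) (hc : 2 ≤ cols) (chunk : List (List Char)) (hl : chunk.length ≤ cols.toNat) :
    pvPadA cols chunk = chunk ++ List.replicate (cols - (chunk.length : Int)).toNat [] := by
  unfold pvPadA
  by_cases h : (chunk.length : Int) < cols
  · rw [if_pos h]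
  · rw [if_neg h]
    have hn : chunk.length = cols.toNat := by omega
    rw [PySem.List.slice_to _ (by omega), List.take_of_length_le (by omega),
        show (cols - (chunk.length : Int)).toNat = 0 by omega]
    simp

-- ===== VERDICT (by name: the statement is the Claim_ definition above) =====
theorem layout_to_grid_spec : Claim_equal_layout_to_grid := by
  intro paragraphs cols _ hpre
  have hc : 2 ≤ cols := hpre
  have h := paraFold cols hc paragraphs [] [] (Or.inl rfl)
  simp only [List.isEmpty_nil, if_pos, List.nil_append] at h
  have hpt : ∀ t : String,
      (pvChunks cols.toNat (t.toList.foldl pvCellStep [[], []])).map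
          (fun line => (pvPadA cols line).map (fun c => String.mk c))
        = (pvChunks cols.toNat (t.toList.foldl pvCellStep [[], []])).map
            (fun chunk => (chunk ++ List.replicate (cols - (chunk.length : Int)).toNat []).map
              (fun c => String.mk c)) := by
    intro t
    apply List.map_congr_left
    intro chunk hchunk
    rw [padA_eq cols hc chunk (chunks_mem_length _ _ chunk hchunk)]
  unfold Spec_layout_to_grid layout_to_grid layout_to_grid_alt
  simp only [h, List.map_flatMap]
  simp only [hpt]
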